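-- pv_equiv track=rewrite | github.com/SouthGreenPlatform/VcfHunter | bin/PhaseInVcfToFasta.2.0.py | CodeIUPAC
-- ===== SOURCE A (Python) =====
-- def CodeIUPAC(GENO, ALLELE):
--
-- 	TODECODE = set()
-- 	for All in GENO:
-- 		TODECODE.add(ALLELE[int(All)])
--
-- 	if "A" in TODECODE or "a" in TODECODE:
-- 		if "G" in TODECODE or "g" in TODECODE:
-- 			if "C" in TODECODE or "c" in TODECODE:
-- 				if "T" in TODECODE or "t" in TODECODE:
-- 					return "N"
-- 				else:
-- 					return "V"
-- 			elif "T" in TODECODE or "t" in TODECODE: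
-- 				return "D"
-- 			else:
-- 				return "R"
-- 		elif "C" in TODECODE or "c" in TODECODE:
-- 			if "T" in TODECODE or "t" in TODECODE:
-- 				return "H"
-- 			else:
-- 				return "M"
-- 		elif "T" in TODECODE or "t" in TODECODE:
-- 			return "W"
-- 		else:
-- 			return "A"
-- 	elif "G" in TODECODE or "g" in TODECODE:
-- 		if "C" in TODECODE or "c" in TODECODE:
-- 			if "T" in TODECODE or "t" in TODECODE:
-- 				return "B"
-- 			else:
-- 				return "S"
-- 		elif "T" in TODECODE or "t" in TODECODE:
-- 			return "K"
-- 		else: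
-- 			return "G"
-- 	elif "C" in TODECODE or "c" in TODECODE:
-- 		if "T" in TODECODE or "t" in TODECODE:
-- 			return "Y"
-- 		else:
-- 			return "C"
-- 	else:
-- 		return "T"
-- ===== SOURCE B (Python) =====
-- _PAIRS = (("A", "a"), ("C", "c"), ("G", "g"), ("T", "t"))
--
-- _IUPAC = {frozenset(s): c for s, c in (
--     ("", "T"), ("A", "A"), ("C", "C"), ("G", "G"), ("T", "T"),
--     ("AC", "M"), ("AG", "R"), ("AT", "W"), ("CG", "S"), ("CT", "Y"), ("GT", "K"),
--     ("ACG", "V"), ("ACT", "H"), ("AGT", "D"), ("CGT", "B"), ("ACGT", "N"))}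
--
--
-- def CodeIUPAC(GENO, ALLELE):
--     decoded = [ALLELE[int(All)] for All in GENO]
--     present = frozenset(u for u, l in _PAIRS if u in decoded or l in decoded)
--     return _IUPAC[present]
-- ===== Notes on version B (the rewrite author's own statement) =====
-- stated objective: simpler
-- what changed: Replaces A's 15-way nested if/elif cascade over set membership with decoding the alleles into a list once and looking the frozenset of present bases up in a fixed 16-entry IUPAC table.
import Mathlib
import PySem

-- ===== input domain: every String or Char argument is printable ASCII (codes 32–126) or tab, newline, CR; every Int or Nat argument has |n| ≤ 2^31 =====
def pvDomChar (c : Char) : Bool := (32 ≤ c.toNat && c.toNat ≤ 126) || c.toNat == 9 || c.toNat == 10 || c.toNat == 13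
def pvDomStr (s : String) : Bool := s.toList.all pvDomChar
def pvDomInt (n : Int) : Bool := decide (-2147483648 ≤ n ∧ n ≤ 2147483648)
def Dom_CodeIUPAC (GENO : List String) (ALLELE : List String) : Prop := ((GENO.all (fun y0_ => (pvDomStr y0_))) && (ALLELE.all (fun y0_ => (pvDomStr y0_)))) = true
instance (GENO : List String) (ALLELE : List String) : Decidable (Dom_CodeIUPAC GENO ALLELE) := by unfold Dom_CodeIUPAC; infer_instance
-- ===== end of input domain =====

-- B replaces A's 15-way nested if/elif cascade by a table: the set of present bases
-- (decoded the same way, ALLELE[int(All)]) is looked up in a fixed 16-entry IUPAC map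
-- (objective: simpler). Return-value equivalence is proved on Pre_ (where A raises no exception).

-- ===== PORT A =====
-- the loop 'for All in GENO: TODECODE.add(ALLELE[int(All)])'; none = int()/indexing raised
def pvLoopA (ALLELE : List String) : List String → PySem.Set String → Option (PySem.Set String)
  | [], acc => some acc
  | All :: rest, acc =>
    match PySem.Int.ofStr? All with
    | none => none
    | some n =>
      match PySem.List.pyGet? ALLELE n with
      | none => none
      | some v => pvLoopA ALLELE rest (PySem.Set.add acc v)

def CodeIUPAC (GENO : List String) (ALLELE : List String) : String :=
  match pvLoopA ALLELE GENO PySem.Set.empty with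
  | none => ""   -- Python raises here: outside Pre_CodeIUPAC
  | some T =>
    if PySem.Set.contains T "A" || PySem.Set.contains T "a" then
      if PySem.Set.contains T "G" || PySem.Set.contains T "g" then
        if PySem.Set.contains T "C" || PySem.Set.contains T "c" then
          if PySem.Set.contains T "T" || PySem.Set.contains T "t" then "N" else "V"
        else if PySem.Set.contains T "T" || PySem.Set.contains T "t" then "D"
        else "R"
      else if PySem.Set.contains T "C" || PySem.Set.contains T "c" then
        if PySem.Set.contains T "T" || PySem.Set.contains T "t" then "H" else "M"
      else if PySem.Set.contains T "T" || PySem.Set.contains T "t" then "W"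
      else "A"
    else if PySem.Set.contains T "G" || PySem.Set.contains T "g" then
      if PySem.Set.contains T "C" || PySem.Set.contains T "c" then
        if PySem.Set.contains T "T" || PySem.Set.contains T "t" then "B" else "S"
      else if PySem.Set.contains T "T" || PySem.Set.contains T "t" then "K"
      else "G"
    else if PySem.Set.contains T "C" || PySem.Set.contains T "c" then
      if PySem.Set.contains T "T" || PySem.Set.contains T "t" then "Y" else "C"
    else "T"

-- ===== PORT B =====
def pvPairs : List (String × String) := [("A", "a"), ("C", "c"), ("G", "g"), ("T", "t")]

-- _IUPAC: frozenset keys are represented canonically as the sublist of ["A","C","G","T"]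
-- in that order; this is exact because `present` below is a filter of pvPairs in that
-- same order, so frozenset equality coincides with list equality of these keys.
def pvTable : List (List String × String) :=
  [([], "T"), (["A"], "A"), (["C"], "C"), (["G"], "G"), (["T"], "T"),
   (["A", "C"], "M"), (["A", "G"], "R"), (["A", "T"], "W"),
   (["C", "G"], "S"), (["C", "T"], "Y"), (["G", "T"], "K"),
   (["A", "C", "G"], "V"), (["A", "C", "T"], "H"), (["A", "G", "T"], "D"),
   (["C", "G", "T"], "B"), (["A", "C", "G", "T"], "N")]

-- 'decoded = [ALLELE[int(All)] for All in GENO]'; none = int()/indexing raised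
def pvDecodeB (ALLELE : List String) : List String → Option (List String)
  | [] => some []
  | All :: rest =>
    match PySem.Int.ofStr? All with
    | none => none
    | some n =>
      match PySem.List.pyGet? ALLELE n with
      | none => none
      | some v => (pvDecodeB ALLELE rest).map (v :: ·)

def CodeIUPAC_alt (GENO : List String) (ALLELE : List String) : String :=
  match pvDecodeB ALLELE GENO with
  | none => ""   -- Python raises here: outside Pre_CodeIUPAC
  | some decoded =>
    let present := (pvPairs.filter (fun p => decoded.contains p.1 || decoded.contains p.2)).map Prod.fst
    ((pvTable.find? (fun e => e.1 == present)).map Prod.snd).getD ""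

-- ===== PRECONDITION & SPEC =====
-- Pre_ excludes exactly the inputs where A raises: some entry of GENO is not an int literal
-- (ValueError) or indexes outside ALLELE with Python's negative-index rule (IndexError).
def Pre_CodeIUPAC (GENO : List String) (ALLELE : List String) : Prop :=
  ∀ All ∈ GENO, ((PySem.Int.ofStr? All).any (fun n => (PySem.List.pyGet? ALLELE n).isSome)) = true
instance (GENO : List String) (ALLELE : List String) : Decidable (Pre_CodeIUPAC GENO ALLELE) := by
  unfold Pre_CodeIUPAC; infer_instance

def pvWitness_CodeIUPAC : List String × List String := (["0", "1", "-1"], ["A", "g"])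

def Spec_CodeIUPAC (GENO : List String) (ALLELE : List String) (out : String) : Prop := out = CodeIUPAC_alt GENO ALLELE
instance (GENO : List String) (ALLELE : List String) (out : String) : Decidable (Spec_CodeIUPAC GENO ALLELE out) := by unfold Spec_CodeIUPAC; infer_instance

-- ===== CLAIM (what is proved, stated in full; the proofs are below) =====
def Claim_equal_CodeIUPAC : Prop := ∀ (GENO : List String) (ALLELE : List String), Dom_CodeIUPAC GENO ALLELE → Pre_CodeIUPAC GENO ALLELE → Spec_CodeIUPAC GENO ALLELE (CodeIUPAC GENO ALLELE)

-- ===== LEMMAS AND PROOFS =====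

-- A's loop builds exactly set(decoded) for B's decoded list (or both raise together)
theorem pvLoopA_eq_decodeB (ALLELE : List String) : ∀ (GENO : List String) (acc : PySem.Set String),
    pvLoopA ALLELE GENO acc = (pvDecodeB ALLELE GENO).map (fun d => d.foldl PySem.Set.add acc) := by
  intro GENO
  induction GENO with
  | nil => intro acc; rfl
  | cons All rest ih =>
    intro acc
    simp only [pvLoopA, pvDecodeB]
    cases hn : PySem.Int.ofStr? All with
    | none => simp
    | some n =>
      cases hv : PySem.List.pyGet? ALLELE n with
      | none => simp [hv]
      | some v =>
        simp only [hv, ih]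
        cases pvDecodeB ALLELE rest <;> simp

theorem contains_foldl_add (d : List String) (x : String) :
    PySem.Set.contains (d.foldl PySem.Set.add PySem.Set.empty) x = d.contains x := by
  rw [Bool.eq_iff_iff]
  have : d.foldl PySem.Set.add PySem.Set.empty = PySem.Set.ofList d := (PySem.Set.ofList_eq_foldl d).symm
  rw [this]
  simp [PySem.Set.mem_ofList]

theorem pvDecodeB_isSome (ALLELE : List String) : ∀ (GENO : List String),
    Pre_CodeIUPAC GENO ALLELE → ∃ d, pvDecodeB ALLELE GENO = some d := by
  intro GENO
  induction GENO with
  | nil => intro _; exact ⟨[], rfl⟩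
  | cons All rest ih =>
    intro h
    have h1 := h All (List.mem_cons_self ..)
    obtain ⟨d, hd⟩ := ih (fun s hs => h s (List.mem_cons_of_mem _ hs))
    simp only [pvDecodeB]
    cases hn : PySem.Int.ofStr? All with
    | none => simp [hn, Option.any] at h1
    | some n =>
      cases hv : PySem.List.pyGet? ALLELE n with
      | none => simp [hn, hv, Option.any] at h1
      | some v => exact ⟨v :: d, by simp [hv, hd]⟩

-- ===== VERDICT (by name: the statement is the Claim_ definition above) =====
theorem CodeIUPAC_spec : Claim_equal_CodeIUPAC := by
  intro GENO ALLELE _ hpre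
  unfold Spec_CodeIUPAC CodeIUPAC CodeIUPAC_alt
  obtain ⟨d, hd⟩ := pvDecodeB_isSome ALLELE GENO hpre
  rw [pvLoopA_eq_decodeB, hd]
  simp only [Option.map_some, contains_foldl_add, pvPairs, pvTable,
    List.filter, List.find?]
  generalize (d.contains "A" || d.contains "a") = bA
  generalize (d.contains "C" || d.contains "c") = bC
  generalize (d.contains "G" || d.contains "g") = bG
  generalize (d.contains "T" || d.contains "t") = bT
  cases bA <;> cases bC <;> cases bG <;> cases bT <;> rfl
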